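-- pv_equiv track=rewrite | github.com/khavinshankar/algoexpert | hard/pattern_matcher/program.py | analysePattern
-- ===== SOURCE A (Python) =====
-- def analysePattern(pattern):
--     nx = ny = 0
--     firsty = None
--     for i, char in enumerate(pattern):
--         if char == "y" and firsty == None:
--             firsty = i
--
--         if char == "x": nx += 1
--         else: ny += 1
--
--     return firsty, nx, ny
-- ===== SOURCE B (Python) =====
-- def analysePattern(pattern):
--     nx = pattern.count("x")
--     ny = len(pattern) - nx
--     firsty = pattern.find("y")
--     return (None if firsty == -1 else firsty), nx, ny
-- ===== Notes on version B (the rewrite author's own statement) =====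
-- stated objective: idiomatic
-- what changed: Replaces the single fused enumerate loop with three separate built-in string scans: str.count for nx, len minus nx for ny, and str.find for the first index of the other marker.
import Mathlib
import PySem

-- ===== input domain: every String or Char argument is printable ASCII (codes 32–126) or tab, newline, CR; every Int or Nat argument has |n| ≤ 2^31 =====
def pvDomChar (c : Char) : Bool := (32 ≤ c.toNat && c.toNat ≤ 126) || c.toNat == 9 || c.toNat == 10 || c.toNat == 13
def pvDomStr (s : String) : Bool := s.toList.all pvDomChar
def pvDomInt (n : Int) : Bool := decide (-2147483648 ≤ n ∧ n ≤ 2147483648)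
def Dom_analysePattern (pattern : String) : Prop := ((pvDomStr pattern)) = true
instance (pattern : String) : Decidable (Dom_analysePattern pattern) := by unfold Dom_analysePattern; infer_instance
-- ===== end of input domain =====

-- B replaces A's single fused enumerate loop with three separate built-in string scans (count, len, find); objective: idiomatic.


-- ===== PORT A =====
-- the body of A's for-loop over enumerate(pattern): record first 'y', count 'x' vs non-'x'
def pvStepA (st : Option Int × Int × Int) (ic : Int × Char) : Option Int × Int × Int :=
  let firsty := if ic.2 == 'y' && st.1 == none then some ic.1 else st.1
  if ic.2 == 'x' then (firsty, st.2.1 + 1, st.2.2) else (firsty, st.2.1, st.2.2 + 1)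

def analysePattern (pattern : String) : Option Int × Int × Int :=
  (PySem.List.enumerate pattern.toList 0).foldl pvStepA (none, 0, 0)

-- ===== PORT B =====
def analysePattern_alt (pattern : String) : Option Int × Int × Int :=
  let nx : Int := (PySem.Str.count pattern "x" : Int)
  let ny : Int := PySem.Str.len pattern - nx
  let firsty : Int := PySem.Str.find pattern "y"
  ((if firsty == -1 then none else some firsty), nx, ny)

-- ===== PRECONDITION & SPEC =====
def Spec_analysePattern (pattern : String) (out : Option Int × Int × Int) : Prop := out = analysePattern_alt pattern
instance (pattern : String) (out : Option Int × Int × Int) : Decidable (Spec_analysePattern pattern out) := by unfold Spec_analysePattern; infer_instance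

-- ===== CLAIM (what is proved, stated in full; the proofs are below) =====
def Claim_equal_analysePattern : Prop := ∀ (pattern : String), Dom_analysePattern pattern → Spec_analysePattern pattern (analysePattern pattern)

-- ===== LEMMAS AND PROOFS =====

-- the first index of 'y' in l when l starts at offset s, as A's loop records it
def pvFirstY (l : List Char) (s : Int) : Option Int :=
  (l.idxOf? 'y').map (fun k => s + (k : Int))

theorem pvFirstY_cons (c : Char) (t : List Char) (s : Int) :
    pvFirstY (c :: t) s = if c = 'y' then some s else pvFirstY t (s + 1) := by
  by_cases h : c = 'y' <;> cases hidx : t.idxOf? 'y' <;>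
    simp [pvFirstY, List.idxOf?_cons, h, hidx] <;> push_cast <;> ring

theorem pvStepA_eq (fy : Option Int) (nx ny s : Int) (c : Char) :
    pvStepA (fy, nx, ny) (s, c) =
      ((if c = 'y' ∧ fy = none then some s else fy),
       (if c = 'x' then nx + 1 else nx),
       (if c = 'x' then ny else ny + 1)) := by
  simp [pvStepA]; split_ifs <;> simp_all

-- the invariant of A's fold: first-y short-circuits on a set accumulator; counts add up
theorem analysePattern_loop (l : List Char) (s : Int) (fy : Option Int) (nx ny : Int) :
    (PySem.List.enumerate l s).foldl pvStepA (fy, nx, ny)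
    = ((match fy with | some i => some i | none => pvFirstY l s),
       nx + (l.count 'x' : Int), ny + ((l.length : Int) - (l.count 'x' : Int))) := by
  induction l generalizing s fy nx ny with
  | nil => cases fy <;> simp [PySem.List.enumerate_nil, pvFirstY]
  | cons c t ih =>
    rw [PySem.List.enumerate_cons, List.foldl_cons, pvStepA_eq, ih, pvFirstY_cons]
    by_cases hx : c = 'x' <;> by_cases hy : c = 'y' <;> cases fy <;>
      simp [hx, hy] <;> push_cast <;> ring

theorem count_go_single (x : Char) (l : List Char) (f a : Nat) (hf : l.length ≤ f) :
    PySem.Chars.count.go [x] f l a = a + l.count x := by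
  induction l generalizing f a with
  | nil => cases f <;> simp [PySem.Chars.count.go]
  | cons c t ih =>
    simp only [List.length_cons] at hf
    cases f with
    | zero => omega
    | succ f' =>
      by_cases h : c = x
      · rw [show PySem.Chars.count.go [x] (f'+1) (c::t) a = PySem.Chars.count.go [x] f' t (a+1) from by
          simp [PySem.Chars.count.go, List.isPrefixOf, h]]
        rw [ih f' (a+1) (by omega)]
        simp [List.count_cons, h]; omega
      · have h' : ¬ x = c := fun e => h e.symm
        rw [show PySem.Chars.count.go [x] (f'+1) (c::t) a = PySem.Chars.count.go [x] f' t a from by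
          simp [PySem.Chars.count.go, List.isPrefixOf, h, h']]
        rw [ih f' a (by omega)]
        simp [List.count_cons, h]

theorem count_single (x : Char) (l : List Char) : PySem.Chars.count l [x] = l.count x := by
  simpa [PySem.Chars.count] using count_go_single x l l.length 0 le_rfl

theorem find_go_single (x : Char) (l : List Char) (k : Nat) :
    PySem.Chars.find.go [x] l k =
      (match l.idxOf? x with | none => -1 | some j => (k : Int) + j) := by
  induction l generalizing k with
  | nil => simp [PySem.Chars.find.go]
  | cons c t ih =>
    by_cases h : c = x
    · simp [PySem.Chars.find.go, List.isPrefixOf, h, List.idxOf?_cons]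
    · have h' : ¬ x = c := fun e => h e.symm
      rw [show PySem.Chars.find.go [x] (c::t) k = PySem.Chars.find.go [x] t (k+1) from by
        simp [PySem.Chars.find.go, List.isPrefixOf, h, h']]
      rw [ih (k+1)]
      simp [List.idxOf?_cons, h]
      cases hidx : t.idxOf? x <;> simp <;> push_cast <;> ring

theorem find_single (x : Char) (l : List Char) :
    PySem.Chars.find l [x] = (match l.idxOf? x with | none => -1 | some j => (j : Int)) := by
  simpa using find_go_single x l 0

-- ===== VERDICT (by name: the statement is the Claim_ definition above) =====
theorem analysePattern_spec : Claim_equal_analysePattern := by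
  intro pattern _
  unfold Spec_analysePattern analysePattern analysePattern_alt
  rw [analysePattern_loop]
  simp [count_single, find_single, pvFirstY]
  cases h : pattern.toList.idxOf? 'y' <;> simp [h] <;> omega
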